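-- pv_equiv track=rewrite | github.com/leocelente/report-maker | misc/main.py | make_regex
-- ===== SOURCE A (Python) =====
-- def make_regex(structure, separator):
--     '''
--         Generates the RegEx given structure and separator
--     '''
--     regex = r""
--     for key in structure:
--         if key =="separator":
--             continue
--         # uses Python Named Group RegEx Extension: ?P<group name>
--         regex = regex + \
--             (r"(?P<" + key + ">{" + structure[key]+"})") + separator
--     date_re = r"[\d]{1,2}\-[\d]{1,2}\-[\d]{4}"      # DD-MM-YYYY format date
--     integer_re = r"[\-]?[\d]+"                      # signed integer
--     float_re = r"[\-][\d]+\.[\d]+"                  # signed float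
--     str_re = r"[\w]+"
--     regex = regex.replace(r"{date}", date_re)
--     regex = regex.replace(r"{integer}", integer_re)
--     regex = regex.replace(r"{float}", float_re)
--     regex = regex.replace(r"{str}", str_re)
--     # replaces last separator with EOL
--     return regex[0:-1] + r'$'
-- ===== SOURCE B (Python) =====
-- # B: assembles the body by joining the group pieces and expands the {type}
-- # placeholders in ONE left-to-right scan that jumps from '{' to '{' (a
-- # type->pattern dict decides each placeholder), instead of A's quadratic string
-- # re-concatenation followed by four global .replace rescans of the result.
-- PATTERNS = {
--     "date": r"[\d]{1,2}\-[\d]{1,2}\-[\d]{4}",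
--     "integer": r"[\-]?[\d]+",
--     "float": r"[\-][\d]+\.[\d]+",
--     "str": r"[\w]+",
-- }
--
-- def _expand(s):
--     out = []
--     i = 0
--     while True:
--         j = s.find("{", i)
--         if j == -1:
--             out.append(s[i:])
--             return "".join(out)
--         out.append(s[i:j])
--         for word, pat in PATTERNS.items():
--             if s.startswith(word, j + 1) and s.startswith("}", j + 1 + len(word)):
--                 out.append(pat)
--                 i = j + 1 + len(word) + 1
--                 break
--         else:
--             out.append("{")
--             i = j + 1
--
-- def make_regex(structure, separator):
--     body = "".join("(?P<" + k + ">{" + v + "})" + separator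
--                    for k, v in structure.items() if k != "separator")
--     return _expand(body)[:-1] + "$"
-- ===== Notes on version B (the rewrite author's own statement) =====
-- stated objective: faster
-- what changed: B joins the group pieces instead of A's repeated whole-string re-concatenation, and expands the {type} placeholders in ONE left-to-right scan that jumps from '{' to '{' deciding each placeholder with a type->pattern dict, instead of A's four sequential global .replace rescans; the tokens are pairwise non-overlapping and no replacement creates a new token, so the single scan yields A's exact string.
import Mathlib
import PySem

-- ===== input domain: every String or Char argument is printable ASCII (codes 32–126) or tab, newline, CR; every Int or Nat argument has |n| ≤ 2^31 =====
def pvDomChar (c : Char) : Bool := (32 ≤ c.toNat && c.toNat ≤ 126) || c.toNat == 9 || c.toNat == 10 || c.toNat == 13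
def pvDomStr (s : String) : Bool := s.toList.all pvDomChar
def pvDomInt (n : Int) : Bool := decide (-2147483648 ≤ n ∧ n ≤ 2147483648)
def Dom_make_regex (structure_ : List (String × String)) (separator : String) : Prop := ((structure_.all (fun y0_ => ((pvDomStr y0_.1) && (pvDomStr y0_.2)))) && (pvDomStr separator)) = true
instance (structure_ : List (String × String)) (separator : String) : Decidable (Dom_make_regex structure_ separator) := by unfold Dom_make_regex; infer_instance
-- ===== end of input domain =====

-- B assembles the body by joining the group pieces and expands the {type} placeholders
-- in ONE left-to-right scan over that string (a tokenizer driven by a type->pattern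
-- table), instead of A's repeated string re-concatenation followed by four global
-- .replace rescans of the whole result; same return value.

-- ===== PORT A =====
def make_regex (structure_ : List (String × String)) (separator : String) : String :=
  let regex : String := structure_.foldl (fun regex kv =>
    if kv.1 == "separator" then regex
    else regex ++ ("(?P<" ++ kv.1 ++ ">{" ++ (PySem.Dict.mk structure_).getD kv.1 "" ++ "})") ++ separator) ""
  let regex := PySem.Str.replace regex "{date}" "[\\d]{1,2}\\-[\\d]{1,2}\\-[\\d]{4}"
  let regex := PySem.Str.replace regex "{integer}" "[\\-]?[\\d]+"
  let regex := PySem.Str.replace regex "{float}" "[\\-][\\d]+\\.[\\d]+"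
  let regex := PySem.Str.replace regex "{str}" "[\\w]+"
  PySem.Str.slice regex (some 0) (some (-1)) ++ "$"

-- ===== PORT B =====
-- port of Source B's _expand: one left-to-right scan that jumps to the next '{'
-- (find), copies the skipped chunk verbatim, and at each '{' tries the four
-- PATTERNS entries — `s.startswith(word, j+1) and s.startswith("}", j+1+len(word))`
-- is ported as the fused prefix test `(word ++ "}").isPrefixOf r`
def expandL (s : List Char) : List Char :=
  let pre := s.takeWhile (fun c => c != '{')
  match h : s.dropWhile (fun c => c != '{') with
  | [] => pre
  | _ :: r =>
    if "date}".toList.isPrefixOf r then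
      pre ++ "[\\d]{1,2}\\-[\\d]{1,2}\\-[\\d]{4}".toList ++ expandL (r.drop 5)
    else if "integer}".toList.isPrefixOf r then
      pre ++ "[\\-]?[\\d]+".toList ++ expandL (r.drop 8)
    else if "float}".toList.isPrefixOf r then
      pre ++ "[\\-][\\d]+\\.[\\d]+".toList ++ expandL (r.drop 6)
    else if "str}".toList.isPrefixOf r then
      pre ++ "[\\w]+".toList ++ expandL (r.drop 4)
    else pre ++ '{' :: expandL r
termination_by s.length
decreasing_by
  all_goals
    (have hle := List.length_dropWhile_le (p := fun c => c != '{') (l := s);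
     rw [h] at hle; simp at hle ⊢; omega)

def make_regex_alt (structure_ : List (String × String)) (separator : String) : String :=
  let body := PySem.Str.join ""
    (((PySem.Dict.mk structure_).items.filter (fun kv => !(kv.1 == "separator"))).map
      (fun kv => "(?P<" ++ kv.1 ++ ">{" ++ kv.2 ++ "})" ++ separator))
  let expanded := String.ofList (expandL body.toList)
  PySem.Str.slice expanded (some 0) (some (-1)) ++ "$"

-- ===== PRECONDITION & SPEC =====
-- Pre_ excludes only association lists with duplicate keys: they do not represent any
-- Python dict (whose keys are unique), and Python A raises a TypeError when handed such
-- a raw list of pairs instead of a dict.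
def Pre_make_regex (structure_ : List (String × String)) (separator : String) : Prop :=
  (structure_.map Prod.fst).Nodup

instance (structure_ : List (String × String)) (separator : String) : Decidable (Pre_make_regex structure_ separator) := by
  unfold Pre_make_regex; infer_instance

def pvWitness_make_regex : (List (String × String)) × String :=
  ([("day", "date"), ("n", "integer"), ("name", "str")], ", ")

def Spec_make_regex (structure_ : List (String × String)) (separator : String) (out : String) : Prop := out = make_regex_alt structure_ separator
instance (structure_ : List (String × String)) (separator : String) (out : String) : Decidable (Spec_make_regex structure_ separator out) := by unfold Spec_make_regex; infer_instance

-- ===== CLAIM (what is proved, stated in full; the proofs are below) =====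
def Claim_equal_make_regex : Prop := ∀ (structure_ : List (String × String)) (separator : String), Dom_make_regex structure_ separator → Pre_make_regex structure_ separator → Spec_make_regex structure_ separator (make_regex structure_ separator)

-- ===== LEMMAS AND PROOFS =====

-- proof-side specification of the scan: the same tokenizer written char by char
def scanL : List Char → List Char
  | [] => []
  | c :: t =>
    if "{date}".toList.isPrefixOf (c :: t) then
      "[\\d]{1,2}\\-[\\d]{1,2}\\-[\\d]{4}".toList ++ scanL (t.drop 5)
    else if "{integer}".toList.isPrefixOf (c :: t) then
      "[\\-]?[\\d]+".toList ++ scanL (t.drop 8)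
    else if "{float}".toList.isPrefixOf (c :: t) then
      "[\\-][\\d]+\\.[\\d]+".toList ++ scanL (t.drop 6)
    else if "{str}".toList.isPrefixOf (c :: t) then
      "[\\w]+".toList ++ scanL (t.drop 4)
    else c :: scanL t
termination_by l => l.length
decreasing_by
  all_goals (simp [List.length_drop]; try omega)

-- a clean structural recursion equal to PySem.Chars.replace (for nonempty pattern)
def repl (old new : List Char) : List Char → List Char
  | [] => []
  | c :: t =>
    if old.isPrefixOf (c :: t) then new ++ repl old new (t.drop (old.length - 1))
    else c :: repl old new t
termination_by l => l.length
decreasing_by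
  · simpa using Nat.lt_succ_of_le (Nat.le_trans (List.length_drop ▸ Nat.sub_le _ _) (Nat.le_refl _))
  · simp

theorem repl_go (old new : List Char) (hold : old ≠ []) :
    ∀ (fuel : Nat) (l acc : List Char), l.length ≤ fuel →
      PySem.Chars.replace.go old new fuel l acc = acc.reverse ++ repl old new l := by
  obtain ⟨o, os, rfl⟩ := List.exists_cons_of_ne_nil hold
  intro fuel
  induction fuel with
  | zero =>
    intro l acc hl
    have hnil : l = [] := List.eq_nil_of_length_eq_zero (Nat.le_zero.mp hl)
    subst hnil
    rw [PySem.Chars.replace.go.eq_def]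
    simp [repl]
  | succ fuel ih =>
    intro l acc hl
    cases l with
    | nil =>
      rw [PySem.Chars.replace.go.eq_def]
      simp [repl]
    | cons c t =>
      rw [PySem.Chars.replace.go.eq_def]
      simp only []
      by_cases hp : (o :: os).isPrefixOf (c :: t) = true
      · rw [if_pos hp]
        rw [show (o :: os).length = os.length + 1 from by simp, List.drop_succ_cons]
        rw [ih (t.drop os.length) _ (by simp at hl ⊢; omega)]
        rw [repl, if_pos hp]
        simp [List.reverse_append]
      · rw [if_neg hp]
        rw [ih t _ (by simp at hl ⊢; omega)]
        rw [repl, if_neg hp]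
        simp

theorem replace_eq_repl (old new s : List Char) (hold : old ≠ []) :
    PySem.Chars.replace s old new = repl old new s := by
  unfold PySem.Chars.replace
  rw [if_neg (by simpa [List.isEmpty_iff] using hold)]
  simpa using repl_go old new hold s.length s [] (Nat.le_refl _)

theorem repl_nil (old new : List Char) : repl old new [] = [] := by simp [repl]

theorem scanL_nil : scanL [] = [] := by rw [scanL.eq_def]

theorem scanL_cons (c : Char) (t : List Char) :
    scanL (c :: t) =
      (if "{date}".toList.isPrefixOf (c :: t) then
        "[\\d]{1,2}\\-[\\d]{1,2}\\-[\\d]{4}".toList ++ scanL (t.drop 5)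
      else if "{integer}".toList.isPrefixOf (c :: t) then
        "[\\-]?[\\d]+".toList ++ scanL (t.drop 8)
      else if "{float}".toList.isPrefixOf (c :: t) then
        "[\\-][\\d]+\\.[\\d]+".toList ++ scanL (t.drop 6)
      else if "{str}".toList.isPrefixOf (c :: t) then
        "[\\w]+".toList ++ scanL (t.drop 4)
      else c :: scanL t) := by
  rw [scanL.eq_def]

-- "no occurrence of t can start inside a" — each start offset i in a has a mismatch
-- against t at some index still inside a (so it blocks matches extending into any tail)
abbrev Blocks (a t : List Char) : Prop :=
  ∀ i < a.length, ∃ j < min t.length (a.length - i), a.getD (i + j) ' ' ≠ t.getD j ' '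

theorem not_prefix_of_blocks_head (a t y : List Char) (hb : Blocks a t) (ha : a ≠ []) :
    ¬ (t.isPrefixOf (a ++ y) = true) := by
  intro hp
  obtain ⟨j, hj, hne⟩ := hb 0 (by cases a with | nil => exact absurd rfl ha | cons x l => simp)
  apply hne
  have hpre := List.isPrefixOf_iff_prefix.mp hp
  have hjt : j < t.length := lt_of_lt_of_le hj (min_le_left _ _)
  have hja : j < a.length := by omega
  have h1 : t.getD j ' ' = (a ++ y).getD j ' ' := by
    rw [List.getD_eq_getElem t ' ' hjt, List.getD_eq_getElem (a ++ y) ' ' (by simp; omega)]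
    exact hpre.getElem hjt
  have h2 : (a ++ y).getD j ' ' = a.getD j ' ' := by
    rw [List.getD_eq_getElem (a ++ y) ' ' (by simp; omega), List.getD_eq_getElem a ' ' hja]
    exact List.getElem_append_left hja
  simpa using (h1.trans h2).symm

theorem blocks_tail (x : Char) (a t : List Char) (hb : Blocks (x :: a) t) : Blocks a t := by
  intro i hi
  obtain ⟨j, hj, hne⟩ := hb (i + 1) (by simp; omega)
  have hstep : (x :: a).getD (i + 1 + j) ' ' = a.getD (i + j) ' ' := by
    rw [show i + 1 + j = (i + j) + 1 from by omega]
    simp [List.getD]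
  exact ⟨j, by simp at hj ⊢; omega, fun h => hne (hstep.trans h)⟩

-- a replace passes over a segment in which no occurrence of the pattern can start
theorem repl_append_of_blocks (t p : List Char) :
    ∀ (a y : List Char), Blocks a t → repl t p (a ++ y) = a ++ repl t p y := by
  intro a
  induction a with
  | nil => intro y _; simp
  | cons x a2 ih =>
    intro y hb
    rw [List.cons_append, repl,
        if_neg (by simpa using not_prefix_of_blocks_head (x :: a2) t y hb (by simp))]
    rw [ih y (blocks_tail x a2 t hb)]
    simp

-- a replace fires exactly on its pattern at the head
theorem repl_head_match (t p : List Char) (ht : t ≠ []) (y : List Char) :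
    repl t p (t ++ y) = p ++ repl t p y := by
  obtain ⟨o, os, rfl⟩ := List.exists_cons_of_ne_nil ht
  rw [List.cons_append, repl,
      if_pos (List.isPrefixOf_iff_prefix.mpr ⟨y, by simp⟩)]
  congr 1
  rw [show (o :: os).length - 1 = os.length from by simp, List.drop_left]

-- a prefix made of chars that are neither '{' (pattern head) nor '[' (replacement head)
-- survives a replace unchanged: if it prefixes the output it prefixed the input
theorem prefix_through_repl (w t p : List Char)
    (hw : w.all (fun c => c != '{' && c != '[') = true)
    (ht : t.getD 0 ' ' = '{') (hp : p.getD 0 ' ' = '[') :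
    ∀ s : List Char, w <+: repl t p s → w <+: s := by
  induction w with
  | nil => intro s _; exact List.nil_prefix
  | cons a w2 ih =>
    have haw : (a ≠ '{' ∧ a ≠ '[') ∧ w2.all (fun c => c != '{' && c != '[') = true := by
      simpa using hw
    intro s hpre
    cases s with
    | nil => rw [repl_nil] at hpre; exact absurd (List.prefix_nil.mp hpre) (by simp)
    | cons c t2 =>
      rw [repl] at hpre
      by_cases hm : t.isPrefixOf (c :: t2) = true
      · rw [if_pos hm] at hpre
        exfalso
        have hpne : p ≠ [] := by intro h; rw [h] at hp; exact absurd hp (by decide)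
        obtain ⟨q, qs, rfl⟩ := List.exists_cons_of_ne_nil hpne
        have : a = q := (List.cons_prefix_cons.mp (by simpa using hpre)).1
        have hq : q = '[' := by simpa using hp
        exact haw.1.2 (this.trans hq)
      · rw [if_neg hm] at hpre
        obtain ⟨hac, hw2⟩ := List.cons_prefix_cons.mp hpre
        exact List.cons_prefix_cons.mpr ⟨hac, ih haw.2 t2 hw2⟩

-- ===== the heart: the four sequential replaces equal B's single scan =====

-- if a token "{w}" matches at the head of c :: X and w-prefixes transfer from X to t,
-- the token also matches at the head of c :: t
theorem tok_prefix_lift (w : List Char) (c : Char) (X t : List Char)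
    (h : ('{' :: w).isPrefixOf (c :: X) = true) (htr : w <+: X → w <+: t) :
    ('{' :: w).isPrefixOf (c :: t) = true := by
  obtain ⟨hc, hw⟩ := List.cons_prefix_cons.mp (List.isPrefixOf_iff_prefix.mp h)
  exact List.isPrefixOf_iff_prefix.mpr (List.cons_prefix_cons.mpr ⟨hc, htr hw⟩)

set_option maxRecDepth 65536 in
theorem chain_eq_scan :
    ∀ (n : Nat) (s : List Char), s.length ≤ n →
      repl "{str}".toList "[\\w]+".toList
        (repl "{float}".toList "[\\-][\\d]+\\.[\\d]+".toList
          (repl "{integer}".toList "[\\-]?[\\d]+".toList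
            (repl "{date}".toList "[\\d]{1,2}\\-[\\d]{1,2}\\-[\\d]{4}".toList s)))
      = scanL s := by
  intro n
  induction n with
  | zero =>
    intro s hs
    have : s = [] := List.eq_nil_of_length_eq_zero (Nat.le_zero.mp hs)
    subst this
    simp [repl_nil, scanL_nil]
  | succ n ih =>
    intro s hs
    cases s with
    | nil => simp [repl_nil, scanL_nil]
    | cons c t =>
      by_cases h1 : ("{date}".toList).isPrefixOf (c :: t) = true
      · -- "{date}" at the head: first replace fires, its output "[\d]{…}" blocks the rest
        obtain ⟨rest, hrest⟩ := List.isPrefixOf_iff_prefix.mp h1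
        rw [← hrest, repl_head_match _ _ (by decide),
            repl_append_of_blocks _ _ _ _ (by decide),
            repl_append_of_blocks _ _ _ _ (by decide),
            repl_append_of_blocks _ _ _ _ (by decide)]
        have hr : rest = t.drop 5 := by
          have h := congrArg (List.drop 6) hrest
          simp at h
          first | exact h.symm | exact h
        rw [ih rest (by
          have := congrArg List.length hrest
          simp at this hs ⊢
          omega)]
        rw [hrest, scanL_cons, if_pos h1, hr]
      · by_cases h2 : ("{integer}".toList).isPrefixOf (c :: t) = true
        · obtain ⟨rest, hrest⟩ := List.isPrefixOf_iff_prefix.mp h2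
          rw [← hrest, repl_append_of_blocks _ _ _ _ (by decide),
              repl_head_match _ _ (by decide),
              repl_append_of_blocks _ _ _ _ (by decide),
              repl_append_of_blocks _ _ _ _ (by decide)]
          have hr : rest = t.drop 8 := by
            have h := congrArg (List.drop 9) hrest
            simp at h
            first | exact h.symm | exact h
          rw [ih rest (by
            have := congrArg List.length hrest
            simp at this hs ⊢
            omega)]
          rw [hrest, scanL_cons, if_neg h1, if_pos h2, hr]
        · by_cases h3 : ("{float}".toList).isPrefixOf (c :: t) = true
          · obtain ⟨rest, hrest⟩ := List.isPrefixOf_iff_prefix.mp h3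
            rw [← hrest, repl_append_of_blocks _ _ _ _ (by decide),
                repl_append_of_blocks _ _ _ _ (by decide),
                repl_head_match _ _ (by decide),
                repl_append_of_blocks _ _ _ _ (by decide)]
            have hr : rest = t.drop 6 := by
              have h := congrArg (List.drop 7) hrest
              simp at h
              first | exact h.symm | exact h
            rw [ih rest (by
              have := congrArg List.length hrest
              simp at this hs ⊢
              omega)]
            rw [hrest, scanL_cons, if_neg h1, if_neg h2, if_pos h3, hr]
          · by_cases h4 : ("{str}".toList).isPrefixOf (c :: t) = true
            · obtain ⟨rest, hrest⟩ := List.isPrefixOf_iff_prefix.mp h4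
              rw [← hrest, repl_append_of_blocks _ _ _ _ (by decide),
                  repl_append_of_blocks _ _ _ _ (by decide),
                  repl_append_of_blocks _ _ _ _ (by decide),
                  repl_head_match _ _ (by decide)]
              have hr : rest = t.drop 4 := by
                have h := congrArg (List.drop 5) hrest
                simp at h
                first | exact h.symm | exact h
              rw [ih rest (by
                have := congrArg List.length hrest
                simp at this hs ⊢
                omega)]
              rw [hrest, scanL_cons, if_neg h1, if_neg h2, if_neg h3, if_pos h4, hr]
            · -- no token at the head: every replace copies c, and none of the later
              -- tokens can appear at the head of an earlier replace's output
              have hX1 : "integer}".toList <+: repl "{date}".toList "[\\d]{1,2}\\-[\\d]{1,2}\\-[\\d]{4}".toList t → "integer}".toList <+: t :=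
                prefix_through_repl "integer}".toList "{date}".toList "[\\d]{1,2}\\-[\\d]{1,2}\\-[\\d]{4}".toList
                  (by decide) (by decide) (by decide) t
              have hX2 : "float}".toList <+: repl "{integer}".toList "[\\-]?[\\d]+".toList (repl "{date}".toList "[\\d]{1,2}\\-[\\d]{1,2}\\-[\\d]{4}".toList t) → "float}".toList <+: t := fun h =>
                prefix_through_repl "float}".toList "{date}".toList "[\\d]{1,2}\\-[\\d]{1,2}\\-[\\d]{4}".toList
                  (by decide) (by decide) (by decide) t
                  (prefix_through_repl "float}".toList "{integer}".toList "[\\-]?[\\d]+".toList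
                    (by decide) (by decide) (by decide) (repl "{date}".toList "[\\d]{1,2}\\-[\\d]{1,2}\\-[\\d]{4}".toList t) h)
              have hX3 : "str}".toList <+: repl "{float}".toList "[\\-][\\d]+\\.[\\d]+".toList (repl "{integer}".toList "[\\-]?[\\d]+".toList (repl "{date}".toList "[\\d]{1,2}\\-[\\d]{1,2}\\-[\\d]{4}".toList t)) → "str}".toList <+: t := fun h =>
                prefix_through_repl "str}".toList "{date}".toList "[\\d]{1,2}\\-[\\d]{1,2}\\-[\\d]{4}".toList
                  (by decide) (by decide) (by decide) t
                  (prefix_through_repl "str}".toList "{integer}".toList "[\\-]?[\\d]+".toList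
                    (by decide) (by decide) (by decide) (repl "{date}".toList "[\\d]{1,2}\\-[\\d]{1,2}\\-[\\d]{4}".toList t)
                    (prefix_through_repl "str}".toList "{float}".toList "[\\-][\\d]+\\.[\\d]+".toList
                      (by decide) (by decide) (by decide) (repl "{integer}".toList "[\\-]?[\\d]+".toList (repl "{date}".toList "[\\d]{1,2}\\-[\\d]{1,2}\\-[\\d]{4}".toList t)) h))
              have n2 : ¬ ("{integer}".toList.isPrefixOf (c :: repl "{date}".toList "[\\d]{1,2}\\-[\\d]{1,2}\\-[\\d]{4}".toList t) = true) :=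
                fun hc => h2 (tok_prefix_lift "integer}".toList c (repl "{date}".toList "[\\d]{1,2}\\-[\\d]{1,2}\\-[\\d]{4}".toList t) t hc hX1)
              have n3 : ¬ ("{float}".toList.isPrefixOf (c :: repl "{integer}".toList "[\\-]?[\\d]+".toList (repl "{date}".toList "[\\d]{1,2}\\-[\\d]{1,2}\\-[\\d]{4}".toList t)) = true) :=
                fun hc => h3 (tok_prefix_lift "float}".toList c (repl "{integer}".toList "[\\-]?[\\d]+".toList (repl "{date}".toList "[\\d]{1,2}\\-[\\d]{1,2}\\-[\\d]{4}".toList t)) t hc hX2)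
              have n4 : ¬ ("{str}".toList.isPrefixOf (c :: repl "{float}".toList "[\\-][\\d]+\\.[\\d]+".toList (repl "{integer}".toList "[\\-]?[\\d]+".toList (repl "{date}".toList "[\\d]{1,2}\\-[\\d]{1,2}\\-[\\d]{4}".toList t))) = true) :=
                fun hc => h4 (tok_prefix_lift "str}".toList c (repl "{float}".toList "[\\-][\\d]+\\.[\\d]+".toList (repl "{integer}".toList "[\\-]?[\\d]+".toList (repl "{date}".toList "[\\d]{1,2}\\-[\\d]{1,2}\\-[\\d]{4}".toList t))) t hc hX3)
              have e1 : repl "{date}".toList "[\\d]{1,2}\\-[\\d]{1,2}\\-[\\d]{4}".toList (c :: t) = c :: repl "{date}".toList "[\\d]{1,2}\\-[\\d]{1,2}\\-[\\d]{4}".toList t := by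
                rw [repl, if_neg h1]
              have e2 : repl "{integer}".toList "[\\-]?[\\d]+".toList (c :: repl "{date}".toList "[\\d]{1,2}\\-[\\d]{1,2}\\-[\\d]{4}".toList t) = c :: repl "{integer}".toList "[\\-]?[\\d]+".toList (repl "{date}".toList "[\\d]{1,2}\\-[\\d]{1,2}\\-[\\d]{4}".toList t) := by
                rw [repl, if_neg n2]
              have e3 : repl "{float}".toList "[\\-][\\d]+\\.[\\d]+".toList (c :: repl "{integer}".toList "[\\-]?[\\d]+".toList (repl "{date}".toList "[\\d]{1,2}\\-[\\d]{1,2}\\-[\\d]{4}".toList t)) = c :: repl "{float}".toList "[\\-][\\d]+\\.[\\d]+".toList (repl "{integer}".toList "[\\-]?[\\d]+".toList (repl "{date}".toList "[\\d]{1,2}\\-[\\d]{1,2}\\-[\\d]{4}".toList t)) := by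
                rw [repl, if_neg n3]
              have e4 : repl "{str}".toList "[\\w]+".toList (c :: repl "{float}".toList "[\\-][\\d]+\\.[\\d]+".toList (repl "{integer}".toList "[\\-]?[\\d]+".toList (repl "{date}".toList "[\\d]{1,2}\\-[\\d]{1,2}\\-[\\d]{4}".toList t))) = c :: repl "{str}".toList "[\\w]+".toList (repl "{float}".toList "[\\-][\\d]+\\.[\\d]+".toList (repl "{integer}".toList "[\\-]?[\\d]+".toList (repl "{date}".toList "[\\d]{1,2}\\-[\\d]{1,2}\\-[\\d]{4}".toList t))) := by
                rw [repl, if_neg n4]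
              rw [e1, e2, e3, e4, ih t (by simp at hs; omega),
                  scanL_cons, if_neg h1, if_neg h2, if_neg h3, if_neg h4]

-- ===== the build phases produce the same string =====

theorem foldA_toList (structure_ : List (String × String)) (sep : String)
    (hnd : (structure_.map Prod.fst).Nodup) :
    ∀ (l : List (String × String)) (acc : String), (∀ kv ∈ l, kv ∈ structure_) →
      (l.foldl (fun regex kv =>
          if kv.1 == "separator" then regex
          else regex ++ ("(?P<" ++ kv.1 ++ ">{" ++ (PySem.Dict.mk structure_).getD kv.1 "" ++ "})") ++ sep) acc).toList
      = acc.toList ++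
          (((l.filter (fun kv => !(kv.1 == "separator"))).map
            (fun kv => "(?P<" ++ kv.1 ++ ">{" ++ kv.2 ++ "})" ++ sep)).map String.toList).flatten := by
  intro l
  induction l with
  | nil => intro acc _; simp
  | cons kv rest ih =>
    intro acc hsub
    have hsub' : ∀ kv' ∈ rest, kv' ∈ structure_ := fun kv' h => hsub kv' (List.mem_cons_of_mem _ h)
    simp only [List.foldl_cons]
    by_cases hs : (kv.1 == "separator") = true
    · rw [if_pos hs, ih acc hsub']
      simp [hs]
    · rw [if_neg hs, ih _ hsub']
      have hget : (PySem.Dict.mk structure_).getD kv.1 "" = kv.2 := by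
        apply PySem.Dict.getD_of_mem_items
        · show (kv.1, kv.2) ∈ structure_
          simpa using hsub kv List.mem_cons_self
        · rw [PySem.Dict.keys_mk]; exact hnd
      rw [hget]
      simp only [List.filter_cons, hs, Bool.not_false, if_true, List.map_cons, List.flatten_cons]
      simp [String.toList_append]

theorem join_nil_flatten : ∀ (ls : List (List Char)), PySem.Chars.join [] ls = ls.flatten := by
  intro ls
  induction ls with
  | nil => simp [pysem]
  | cons a r ih =>
    cases r with
    | nil => simp [pysem]
    | cons b r2 =>
      rw [PySem.Chars.join_cons_cons, ih]
      simp

theorem bodyB_toList (structure_ : List (String × String)) (sep : String) :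
    (PySem.Str.join ""
      ((structure_.filter (fun kv => !(kv.1 == "separator"))).map
        (fun kv => "(?P<" ++ kv.1 ++ ">{" ++ kv.2 ++ "})" ++ sep))).toList
    = (((structure_.filter (fun kv => !(kv.1 == "separator"))).map
        (fun kv => "(?P<" ++ kv.1 ++ ">{" ++ kv.2 ++ "})" ++ sep)).map String.toList).flatten := by
  rw [PySem.Str.toList_join, show ("" : String).toList = [] from rfl]
  exact join_nil_flatten _


-- the scan copies a chunk with no '{' verbatim (every token starts with '{')
theorem scanL_no_brace : ∀ (pre y : List Char), (∀ c ∈ pre, ¬ (c = '{')) →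
    scanL (pre ++ y) = pre ++ scanL y := by
  intro pre
  induction pre with
  | nil => intro y _; simp
  | cons a p ih =>
    intro y h
    have na : a ≠ '{' := fun hh => h a List.mem_cons_self hh
    have nt : ∀ (w : List Char), ¬ (('{' :: w).isPrefixOf (a :: (p ++ y)) = true) :=
      fun w hc => na ((List.cons_prefix_cons.mp (List.isPrefixOf_iff_prefix.mp hc)).1.symm)
    have n1 : ¬ ("{date}".toList.isPrefixOf (a :: (p ++ y)) = true) := nt "date}".toList
    have n2 : ¬ ("{integer}".toList.isPrefixOf (a :: (p ++ y)) = true) := nt "integer}".toList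
    have n3 : ¬ ("{float}".toList.isPrefixOf (a :: (p ++ y)) = true) := nt "float}".toList
    have n4 : ¬ ("{str}".toList.isPrefixOf (a :: (p ++ y)) = true) := nt "str}".toList
    rw [List.cons_append, scanL_cons, if_neg n1, if_neg n2, if_neg n3, if_neg n4,
        ih y (fun c hc => h c (List.mem_cons_of_mem _ hc))]
    simp

-- dropping the shared '{' head of a token test
theorem brace_tok (w r : List Char) :
    (('{' :: w).isPrefixOf ('{' :: r)) = (w.isPrefixOf r) := by
  simp [List.isPrefixOf]

-- Source B's find-jump scan computes the char-by-char scan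
theorem expand_eq_scan : ∀ (n : Nat) (s : List Char), s.length ≤ n → expandL s = scanL s := by
  intro n
  induction n with
  | zero =>
    intro s hs
    have hnil : s = [] := List.eq_nil_of_length_eq_zero (Nat.le_zero.mp hs)
    subst hnil
    rw [expandL.eq_def]
    simp [scanL_nil]
  | succ n ih =>
    intro s hs
    have hsplit' := List.takeWhile_append_dropWhile (p := fun c => c != '{') (l := s)
    have hpre : ∀ c ∈ s.takeWhile (fun c => c != '{'), ¬ (c = '{') := by
      intro c hc hcc
      have := List.mem_takeWhile_imp hc
      simp [hcc] at this
    cases hsplit : s.dropWhile (fun c => c != '{') with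
    | nil =>
      rw [expandL.eq_def, hsplit]
      conv_rhs => rw [← hsplit', hsplit]
      rw [scanL_no_brace _ _ hpre, scanL_nil, List.append_nil]
    | cons b r =>
      have hb : b = '{' := by
        have h2 := List.head_dropWhile_not (p := fun c => c != '{') (l := s) (by simp [hsplit])
        have h3 : (s.dropWhile (fun c => c != '{')).head (by simp [hsplit]) = b := by
          simp [hsplit]
        rw [h3] at h2
        simpa using h2
      have hr : r.length ≤ n := by
        have hle := List.length_dropWhile_le (p := fun c => c != '{') (l := s)
        rw [hsplit] at hle
        simp at hle hs
        omega
      subst hb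
      rw [expandL.eq_def, hsplit]
      conv_rhs => rw [← hsplit', hsplit]
      rw [scanL_no_brace _ _ hpre, scanL_cons]
      have c1 : ("{date}".toList.isPrefixOf ('{' :: r)) = ("date}".toList.isPrefixOf r) :=
        brace_tok "date}".toList r
      have c2 : ("{integer}".toList.isPrefixOf ('{' :: r)) = ("integer}".toList.isPrefixOf r) :=
        brace_tok "integer}".toList r
      have c3 : ("{float}".toList.isPrefixOf ('{' :: r)) = ("float}".toList.isPrefixOf r) :=
        brace_tok "float}".toList r
      have c4 : ("{str}".toList.isPrefixOf ('{' :: r)) = ("str}".toList.isPrefixOf r) :=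
        brace_tok "str}".toList r
      rw [c1, c2, c3, c4]
      simp only []
      split_ifs with hd hi hf hst
      · rw [ih (r.drop 5) (by simp; omega)]; simp
      · rw [ih (r.drop 8) (by simp; omega)]; simp
      · rw [ih (r.drop 6) (by simp; omega)]; simp
      · rw [ih (r.drop 4) (by simp; omega)]; simp
      · rw [ih r hr]

theorem expandL_eq_scanL (s : List Char) : expandL s = scanL s :=
  expand_eq_scan s.length s (Nat.le_refl _)

-- ===== VERDICT (by name: the statement is the Claim_ definition above) =====
theorem make_regex_spec : Claim_equal_make_regex := by
  unfold Claim_equal_make_regex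
  intro structure_ separator _hdom hpre
  unfold Spec_make_regex make_regex make_regex_alt
  apply congrArg (fun r => PySem.Str.slice r (some 0) (some (-1)) ++ "$")
  apply String.toList_inj.mp
  simp only [PySem.Str.replace, String.toList_ofList]
  rw [replace_eq_repl _ _ _ (by decide), replace_eq_repl _ _ _ (by decide),
      replace_eq_repl _ _ _ (by decide), replace_eq_repl _ _ _ (by decide)]
  rw [chain_eq_scan _ _ (Nat.le_refl _), expandL_eq_scanL]
  rw [foldA_toList structure_ separator hpre structure_ "" (fun kv h => h)]
  rw [show ("" : String).toList = [] from rfl, List.nil_append]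
  rw [bodyB_toList]
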